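-- pv_equiv track=rewrite | github.com/zidan0x266/Ganesan-Group | individuals/Zidan/analysis_lioxygen.py | getoxygen
-- ===== SOURCE A (Python) =====
-- import math
-- from collections import Counter
--
-- def getoxygen(ASSO, DP):
--     firstli = True
--     litfsi = []
--     t1 = 0
--     for asso in ASSO:
--         lidx = asso[0]  # lithium index
--         oxydx = asso[1]  # polycation index
--         tfsi = int(math.floor(oxydx / DP) + 1)  # polymer chain index
--         litfsi.append((lidx, tfsi))
--     mono, bi = 0, 0
--     for _, val in Counter(litfsi).items():
--         if val == 1:
--             mono += 1
--         if val == 2: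
--             bi += 1
--     return mono, bi
-- ===== SOURCE B (Python) =====
-- def getoxygen(ASSO, DP):
--     # build (lithium index, chain index) pairs, sort, then count run lengths
--     litfsi = sorted((asso[0], asso[1] // DP + 1) for asso in ASSO)
--     mono, bi = 0, 0
--     i, n = 0, len(litfsi)
--     while i < n:
--         j = i + 1
--         while j < n and litfsi[j] == litfsi[i]:
--             j += 1
--         run = j - i
--         if run == 1:
--             mono += 1
--         if run == 2:
--             bi += 1
--         i = j
--     return mono, bi
-- ===== Notes on version B (the rewrite author's own statement) =====
-- stated objective: alternative
-- what changed: Replaces the Counter hash-map multiplicity pass with a sort followed by a two-pointer run-length scan over the sorted pair list, counting runs of length 1 and 2 directly (and uses // instead of math.floor(a/b), exact for the 32-bit domain).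
import Mathlib
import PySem

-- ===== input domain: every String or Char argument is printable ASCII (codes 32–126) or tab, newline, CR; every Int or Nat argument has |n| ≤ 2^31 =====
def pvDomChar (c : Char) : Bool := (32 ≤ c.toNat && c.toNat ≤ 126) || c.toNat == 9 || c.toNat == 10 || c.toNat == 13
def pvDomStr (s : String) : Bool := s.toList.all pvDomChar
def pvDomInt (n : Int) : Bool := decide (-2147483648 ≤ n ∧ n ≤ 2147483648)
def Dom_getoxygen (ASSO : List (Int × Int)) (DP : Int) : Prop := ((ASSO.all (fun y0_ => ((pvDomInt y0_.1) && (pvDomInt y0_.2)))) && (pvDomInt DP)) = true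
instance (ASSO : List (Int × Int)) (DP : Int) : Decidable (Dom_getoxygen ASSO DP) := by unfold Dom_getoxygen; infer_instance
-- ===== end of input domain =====

-- B replaces A's Counter multiplicity pass by sort + run-length scan over the pair list (alternative decomposition, same values).


-- ===== PORT A =====
-- tfsi = int(math.floor(oxydx / DP) + 1): ported as floordiv oxydx DP + 1, exact on Dom
-- (|ints| ≤ 2^31 < 2^53, so the float true division floors to exactly oxydx // DP).
def getoxygen (ASSO : List (Int × Int)) (DP : Int) : Int × Int :=
  let litfsi := ASSO.foldl (fun acc asso =>
      let lidx := asso.1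
      let oxydx := asso.2
      let tfsi := PySem.Int.floordiv oxydx DP + 1
      acc ++ [(lidx, tfsi)]) ([] : List (Int × Int))
  (PySem.Dict.counter litfsi).items.foldl
    (fun (s : Int × Int) kv =>
      let mono := if kv.2 = 1 then s.1 + 1 else s.1
      let bi := if kv.2 = 2 then s.2 + 1 else s.2
      (mono, bi)) (0, 0)

-- ===== PORT B =====
-- the outer/inner while loops of Source B: advance j over the run of elements equal to litfsi[i]
def rleCount : List (Int × Int) → Int → Int → Int × Int
  | [], mono, bi => (mono, bi)
  | x :: rest, mono, bi =>
    let run := (rest.takeWhile (fun y => y == x)).length + 1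
    rleCount (rest.dropWhile (fun y => y == x))
      (if run = 1 then mono + 1 else mono)
      (if run = 2 then bi + 1 else bi)
termination_by l _ _ => l.length
decreasing_by simpa using Nat.lt_succ_of_le (List.length_dropWhile_le _ rest)

def getoxygen_alt (ASSO : List (Int × Int)) (DP : Int) : Int × Int :=
  let litfsi := PySem.List.sorted2
      (ASSO.map (fun asso => (asso.1, PySem.Int.floordiv asso.2 DP + 1)))
      (fun p => p.1) (fun p => p.2)
  rleCount litfsi 0 0

-- ===== PRECONDITION & SPEC =====
-- Pre_ excludes exactly the inputs where Python A raises ZeroDivisionError: DP = 0 with a nonempty ASSO.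
def Pre_getoxygen (ASSO : List (Int × Int)) (DP : Int) : Prop := ASSO = [] ∨ DP ≠ 0
instance (ASSO : List (Int × Int)) (DP : Int) : Decidable (Pre_getoxygen ASSO DP) := by unfold Pre_getoxygen; infer_instance
def pvWitness_getoxygen : (List (Int × Int)) × Int := ([(0, 1), (0, 5), (1, 2), (0, 1)], 2)

def Spec_getoxygen (ASSO : List (Int × Int)) (DP : Int) (out : Int × Int) : Prop := out = getoxygen_alt ASSO DP
instance (ASSO : List (Int × Int)) (DP : Int) (out : Int × Int) : Decidable (Spec_getoxygen ASSO DP out) := by unfold Spec_getoxygen; infer_instance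

-- ===== CLAIM (what is proved, stated in full; the proofs are below) =====
def Claim_equal_getoxygen : Prop := ∀ (ASSO : List (Int × Int)) (DP : Int), Dom_getoxygen ASSO DP → Pre_getoxygen ASSO DP → Spec_getoxygen ASSO DP (getoxygen ASSO DP)

-- ===== LEMMAS AND PROOFS =====

-- lexicographic ≤ on pairs (Python's tuple order)
def lexLE (a b : Int × Int) : Prop := a.1 < b.1 ∨ (a.1 = b.1 ∧ a.2 ≤ b.2)

-- the comparison closure sorted2 uses
def lexBefore (a b : Int × Int) : Bool :=
  decide (a.1 < b.1) || (!decide (b.1 < a.1) && decide (a.2 < b.2))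

-- the shared pair list
def mkPairs (ASSO : List (Int × Int)) (DP : Int) : List (Int × Int) :=
  ASSO.map (fun asso => (asso.1, PySem.Int.floordiv asso.2 DP + 1))

-- number of distinct pairs occurring exactly n times
def numK (n : Nat) (L : List (Int × Int)) : Nat :=
  (PySem.List.dedup L).countP (fun k => L.count k == n)

lemma lexLE_trans {a b c : Int × Int} (h1 : lexLE a b) (h2 : lexLE b c) : lexLE a c := by
  unfold lexLE at *; omega

lemma lexLE_antisymm {a b : Int × Int} (h1 : lexLE a b) (h2 : lexLE b a) : a = b := by
  unfold lexLE at *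
  have h3 : a.1 = b.1 ∧ a.2 = b.2 := by omega
  exact Prod.ext h3.1 h3.2

lemma lexBefore_true {a b : Int × Int} (h : lexBefore a b = true) : lexLE a b := by
  unfold lexBefore at h; unfold lexLE; simp at h; omega

lemma lexBefore_false {a b : Int × Int} (h : lexBefore a b = false) : lexLE b a := by
  unfold lexBefore at h; unfold lexLE; simp at h; omega

lemma insertBy_pairwise (x : Int × Int) (l : List (Int × Int)) (h : l.Pairwise lexLE) :
    (PySem.List.insertBy lexBefore x l).Pairwise lexLE := by
  induction l with
  | nil => simp [PySem.List.insertBy]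
  | cons y ys ih =>
    rw [List.pairwise_cons] at h
    obtain ⟨hy, hys⟩ := h
    by_cases hb : lexBefore x y = true
    · rw [show PySem.List.insertBy lexBefore x (y :: ys) = x :: y :: ys by
        simp [PySem.List.insertBy, hb]]
      refine List.Pairwise.cons ?_ (List.Pairwise.cons hy hys)
      intro z hz
      rcases List.mem_cons.mp hz with rfl | hz
      · exact lexBefore_true hb
      · exact lexLE_trans (lexBefore_true hb) (hy z hz)
    · rw [show PySem.List.insertBy lexBefore x (y :: ys) = y :: PySem.List.insertBy lexBefore x ys by
        simp [PySem.List.insertBy, hb]]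
      refine List.Pairwise.cons ?_ (ih hys)
      intro z hz
      rcases (PySem.List.mem_insertBy lexBefore x z ys).mp hz with rfl | hz
      · exact lexBefore_false (by simpa using hb)
      · exact hy z hz

lemma foldl_insertBy_pairwise (xs : List (Int × Int)) (acc : List (Int × Int))
    (h : acc.Pairwise lexLE) :
    (xs.foldl (fun a x => PySem.List.insertBy lexBefore x a) acc).Pairwise lexLE := by
  induction xs generalizing acc with
  | nil => simpa using h
  | cons x xs ih => exact ih _ (insertBy_pairwise x acc h)

lemma sorted2_pairwise_lex (xs : List (Int × Int)) :
    (PySem.List.sorted2 xs (fun p => p.1) (fun p => p.2) false).Pairwise lexLE := by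
  have he : PySem.List.sorted2 xs (fun p => p.1) (fun p => p.2) false
      = xs.foldl (fun a x => PySem.List.insertBy lexBefore x a) [] := rfl
  rw [he]
  exact foldl_insertBy_pairwise xs [] (by simp)

lemma not_mem_dropWhile (x : Int × Int) (rest : List (Int × Int))
    (hp : rest.Pairwise lexLE) (hx : ∀ y ∈ rest, lexLE x y) :
    x ∉ rest.dropWhile (fun y => y == x) := by
  induction rest with
  | nil => simp
  | cons y r ih =>
    rw [List.pairwise_cons] at hp
    by_cases hy : (y == x) = true
    · rw [List.dropWhile_cons, if_pos hy]
      exact ih hp.2 (fun z hz => hx z (List.mem_cons_of_mem _ hz))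
    · rw [List.dropWhile_cons, if_neg hy]
      intro hmem
      rcases List.mem_cons.mp hmem with rfl | hmem
      · simp at hy
      · have h1 : lexLE y x := hp.1 x hmem
        have h2 : lexLE x y := hx y (List.mem_cons_self)
        exact hy (by simp [lexLE_antisymm h1 h2])

lemma rle_spec : ∀ (S : List (Int × Int)), S.Pairwise lexLE → ∀ (m b : Int),
    rleCount S m b = (m + numK 1 S, b + numK 2 S)
  | [], _, m, b => by simp [rleCount, numK, PySem.List.dedup]
  | x :: rest, h, m, b => by
    rw [List.pairwise_cons] at h
    obtain ⟨hx, hrest⟩ := h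
    set t := rest.takeWhile (fun y => y == x) with ht
    set d := rest.dropWhile (fun y => y == x) with hd
    have htd : t ++ d = rest := List.takeWhile_append_dropWhile
    have h1 : ∀ y ∈ t, y = x := by
      intro y hy
      have := List.mem_takeWhile_imp hy
      simpa using this
    have h2 : x ∉ d := not_mem_dropWhile x rest hrest hx
    have hdpair : d.Pairwise lexLE := List.Pairwise.sublist (List.dropWhile_sublist _) hrest
    have hcx : (x :: rest).count x = t.length + 1 := by
      rw [List.count_cons_self, ← htd, List.count_append]
      have hct : t.count x = t.length :=
        List.count_eq_length.mpr (fun y hy => by simp [h1 y hy])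
      have hcd : d.count x = 0 := List.count_eq_zero.mpr h2
      omega
    have hck : ∀ k ∈ d, (x :: rest).count k = d.count k := by
      intro k hk
      have hkx : k ≠ x := fun e => h2 (e ▸ hk)
      rw [List.count_cons, ← htd, List.count_append]
      have hct : t.count k = 0 := List.count_eq_zero.mpr
        (fun hkt => hkx (h1 k hkt))
      simp [hkx.symm, hct]
    have hmem : ∀ a, a ∈ (x :: rest) ↔ a = x ∨ a ∈ d := by
      intro a
      constructor
      · intro ha
        rcases List.mem_cons.mp ha with rfl | ha
        · exact Or.inl rfl
        · rw [← htd] at ha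
          rcases List.mem_append.mp ha with ha | ha
          · exact Or.inl (h1 a ha)
          · exact Or.inr ha
      · rintro (rfl | ha)
        · exact List.mem_cons_self
        · exact List.mem_cons_of_mem _ (by rw [← htd]; exact List.mem_append_right _ ha)
    have hperm : (PySem.List.dedup (x :: rest)).Perm (x :: PySem.List.dedup d) := by
      rw [List.perm_ext_iff_of_nodup (PySem.List.nodup_dedup _)
        (by simpa [PySem.List.nodup_dedup] using h2)]
      intro a
      rw [PySem.List.mem_dedup, hmem a]
      simp [PySem.List.mem_dedup]

    have hnum : ∀ n : Nat, numK n (x :: rest)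
        = (if (x :: rest).count x = n then 1 else 0) + numK n d := by
      intro n
      unfold numK
      rw [hperm.countP_eq, List.countP_cons]
      have hcong : (PySem.List.dedup d).countP (fun k => (x :: rest).count k == n)
          = (PySem.List.dedup d).countP (fun k => d.count k == n) := by
        apply List.countP_congr
        intro k hk
        rw [hck k ((PySem.List.mem_dedup d k).mp hk)]
      rw [hcong]
      simp only [beq_iff_eq]
      split <;> (simp; try omega)
    rw [show rleCount (x :: rest) m b
        = rleCount d (if t.length + 1 = 1 then m + 1 else m)
            (if t.length + 1 = 2 then b + 1 else b) by rw [rleCount]]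
    rw [rle_spec d hdpair _ _]
    have hn1 := hnum 1
    have hn2 := hnum 2
    rw [hcx] at hn1 hn2
    rw [Prod.mk.injEq]
    refine ⟨?_, ?_⟩
    · rw [hn1]; split_ifs <;> (push_cast; omega)
    · rw [hn2]; split_ifs <;> (push_cast; omega)
termination_by S => S.length
decreasing_by simpa using Nat.lt_succ_of_le (List.length_dropWhile_le _ rest)

lemma foldA (l : List ((Int × Int) × Int)) (m b : Int) :
    l.foldl (fun (s : Int × Int) kv =>
      let mono := if kv.2 = 1 then s.1 + 1 else s.1
      let bi := if kv.2 = 2 then s.2 + 1 else s.2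
      (mono, bi)) (m, b)
    = (m + l.countP (fun kv => kv.2 == 1), b + l.countP (fun kv => kv.2 == 2)) := by
  induction l generalizing m b with
  | nil => simp
  | cons kv l ih =>
    simp only [List.foldl_cons, List.countP_cons, ih]
    refine Prod.ext ?_ ?_ <;> (simp [beq_iff_eq]; split <;> ((try push_cast); omega))

lemma getoxygen_eq (ASSO : List (Int × Int)) (DP : Int) :
    getoxygen ASSO DP = ((numK 1 (mkPairs ASSO DP) : Int), (numK 2 (mkPairs ASSO DP) : Int)) := by
  unfold getoxygen
  rw [show ASSO.foldl (fun acc asso =>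
      let lidx := asso.1
      let oxydx := asso.2
      let tfsi := PySem.Int.floordiv oxydx DP + 1
      acc ++ [(lidx, tfsi)]) ([] : List (Int × Int)) = mkPairs ASSO DP by
    simpa using PySem.List.foldl_append_singleton_eq_map
      (fun asso => (asso.1, PySem.Int.floordiv asso.2 DP + 1)) ASSO []]
  show (PySem.Dict.counter (mkPairs ASSO DP)).items.foldl
      (fun (s : Int × Int) kv =>
        let mono := if kv.2 = 1 then s.1 + 1 else s.1
        let bi := if kv.2 = 2 then s.2 + 1 else s.2
        (mono, bi)) (0, 0) = _
  rw [PySem.Dict.items_counter, foldA]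
  rw [Prod.mk.injEq]
  unfold numK
  rw [PySem.List.dedup_eq_ofList, List.countP_map, List.countP_map]
  constructor <;>
    · rw [show (0 : Int) + _ = _ from zero_add _]
      congr 1
      apply List.countP_congr
      intro k _
      simp only [Function.comp, beq_iff_eq]
      constructor <;> intro h <;> omega

lemma numK_perm {S L : List (Int × Int)} (hp : S.Perm L) (n : Nat) : numK n S = numK n L := by
  unfold numK
  have hdp : (PySem.List.dedup S).Perm (PySem.List.dedup L) := by
    rw [List.perm_ext_iff_of_nodup (PySem.List.nodup_dedup _) (PySem.List.nodup_dedup _)]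
    intro a
    rw [PySem.List.mem_dedup, PySem.List.mem_dedup]
    exact hp.mem_iff
  rw [hdp.countP_eq]
  apply List.countP_congr
  intro k _
  rw [hp.count_eq]

lemma getoxygen_alt_eq (ASSO : List (Int × Int)) (DP : Int) :
    getoxygen_alt ASSO DP = ((numK 1 (mkPairs ASSO DP) : Int), (numK 2 (mkPairs ASSO DP) : Int)) := by
  unfold getoxygen_alt
  have hperm := PySem.List.sorted2_perm
    (ASSO.map (fun asso => (asso.1, PySem.Int.floordiv asso.2 DP + 1)))
    (fun p => p.1) (fun p => p.2) false
  rw [rle_spec _ (sorted2_pairwise_lex _) 0 0,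
    numK_perm hperm, numK_perm hperm]
  simp [mkPairs]

-- ===== VERDICT (by name: the statement is the Claim_ definition above) =====
theorem getoxygen_spec : Claim_equal_getoxygen := by
  intro ASSO DP _ _
  unfold Spec_getoxygen
  rw [getoxygen_eq, getoxygen_alt_eq]
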